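-- pv_equiv track=rewrite | github.com/kwitte2232/CS121 | pp4/pet.py | solve
-- ===== SOURCE A (Python) =====
-- def solve(contestant_scores):
--
--     totals = []
--     for score in contestant_scores:
--         total_score = sum(score)
--         totals.append(total_score)
--
--     win_score = max(totals)
--
--     for i, total in enumerate(totals):
--         if total == win_score:
--             winner = i + 1
--
--     # Replace 1 with the winning contestant (remember that
--     # contestants are 1-indexed, not 0-indexed) and replace 0
--     # with the score of the winning contestant.
--     return winner, win_score
-- ===== SOURCE B (Python) =====
-- def solve(contestant_scores):
--     # Single reduction: max over (index, total) pairs; the composite key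
--     # (total, index) makes the LAST contestant win ties, as in A.
--     return max(((i + 1, sum(score)) for i, score in enumerate(contestant_scores)),
--                key=lambda p: (p[1], p[0]))
-- ===== Notes on version B (the rewrite author's own statement) =====
-- stated objective: idiomatic
-- what changed: Replaced A's three phases (build a totals list, take its max, re-scan for the last index attaining it) with one reduction: max over (index+1, total) pairs under the composite key (total, index), whose secondary index component reproduces the last-tie rule.
import Mathlib
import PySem

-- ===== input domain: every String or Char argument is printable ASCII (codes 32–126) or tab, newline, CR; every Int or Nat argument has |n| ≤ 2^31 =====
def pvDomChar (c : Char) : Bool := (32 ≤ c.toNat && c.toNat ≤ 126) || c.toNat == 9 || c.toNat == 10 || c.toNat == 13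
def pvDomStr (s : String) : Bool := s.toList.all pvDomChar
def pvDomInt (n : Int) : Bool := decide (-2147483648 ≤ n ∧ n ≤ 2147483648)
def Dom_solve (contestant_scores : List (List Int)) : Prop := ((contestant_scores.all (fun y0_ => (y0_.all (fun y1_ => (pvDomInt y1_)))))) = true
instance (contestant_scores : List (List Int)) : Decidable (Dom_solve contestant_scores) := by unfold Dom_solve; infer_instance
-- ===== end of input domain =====

-- B replaces A's three phases (totals list, max, re-scan for the last argmax)
-- with a single max-reduction over (index+1, total) pairs under the composite
-- key (total, index); same cost, one pass (objective: idiomatic).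

-- ===== PORT A =====
def solve (contestant_scores : List (List Int)) : Int × Int :=
  let totals := contestant_scores.foldl (fun acc score => acc ++ [score.sum]) []
  match PySem.List.max? totals (fun y => y) with
  | none => (0, 0)  -- Python raises ValueError here (empty input); excluded by Pre_solve
  | some win_score =>
    let winner := (PySem.List.enumerate totals).foldl
      (fun w p => if p.2 = win_score then p.1 + 1 else w) 0
    (winner, win_score)

-- ===== PORT B =====
-- max(gen, key=lambda p: (p[1], p[0])): first element initialises, later ones
-- replace when their key is lexicographically strictly greater.
def solveAltStep (acc : Option (Int × Int)) (p : Int × List Int) : Option (Int × Int) :=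
  let cand : Int × Int := (p.1 + 1, p.2.sum)
  match acc with
  | none => some cand
  | some b => if b.2 < cand.2 ∨ (b.2 = cand.2 ∧ b.1 < cand.1) then some cand else some b

def solve_alt (contestant_scores : List (List Int)) : Int × Int :=
  match (PySem.List.enumerate contestant_scores).foldl solveAltStep none with
  | some r => r
  | none => (0, 0)  -- Python raises ValueError here (empty input); excluded by Pre_solve

-- ===== PRECONDITION & SPEC =====
-- Pre_ excludes only the empty list, where both A and B raise ValueError (max of empty sequence).
def Pre_solve (contestant_scores : List (List Int)) : Prop := contestant_scores ≠ []
instance (contestant_scores : List (List Int)) : Decidable (Pre_solve contestant_scores) := by unfold Pre_solve; infer_instance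
def pvWitness_solve : List (List Int) := [[1, 2], [3], []]

def Spec_solve (contestant_scores : List (List Int)) (out : Int × Int) : Prop := out = solve_alt contestant_scores
instance (contestant_scores : List (List Int)) (out : Int × Int) : Decidable (Spec_solve contestant_scores out) := by unfold Spec_solve; infer_instance

-- ===== CLAIM (what is proved, stated in full; the proofs are below) =====
def Claim_equal_solve : Prop := ∀ (contestant_scores : List (List Int)), Dom_solve contestant_scores → Pre_solve contestant_scores → Spec_solve contestant_scores (solve contestant_scores)

-- ===== LEMMAS AND PROOFS =====

-- The running max of a fold is either the seed or an element of the list.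
lemma foldl_max_mem (l : List Int) : ∀ (m : Int), l.foldl max m = m ∨ l.foldl max m ∈ l := by
  induction l with
  | nil => intro m; left; rfl
  | cons t l ih =>
    intro m
    rcases ih (max m t) with h | h
    · simp only [List.foldl_cons] at *
      rcases le_total m t with hmt | htm
      · right; rw [h, max_eq_right hmt]; exact List.mem_cons_self
      · left; rw [h, max_eq_left htm]
    · right; exact List.mem_cons_of_mem _ h

-- A's last-argmax scan ignores its initial value once the target occurs in the list.
lemma scan_indep (M : Int) (ts : List Int) (hM : M ∈ ts) : ∀ (s a b : Int),
    (PySem.List.enumerate ts s).foldl (fun w p => if p.2 = M then p.1 + 1 else w) a =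
    (PySem.List.enumerate ts s).foldl (fun w p => if p.2 = M then p.1 + 1 else w) b := by
  induction ts with
  | nil => cases hM
  | cons t ts ih =>
    intro s a b
    rw [PySem.List.enumerate_cons]
    simp only [List.foldl_cons]
    by_cases ht : t = M
    · simp [ht]
    · rcases List.mem_cons.mp hM with h | h
      · exact absurd h.symm ht
      · exact ih h _ _ _

-- Main invariant: B's one-pass fold carries exactly (A's last-argmax scan, A's running max).
lemma main_inv (cs : List (List Int)) : ∀ (s w m M : Int), w ≤ s →
    M = (cs.map (fun x => x.sum)).foldl max m →
    (PySem.List.enumerate cs s).foldl solveAltStep (some (w, m)) =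
    some ((PySem.List.enumerate (cs.map (fun x => x.sum)) s).foldl
            (fun w p => if p.2 = M then p.1 + 1 else w) w, M) := by
  induction cs with
  | nil =>
    intro s w m M _ hM
    simp only [List.map_nil, List.foldl_nil] at hM
    simp [PySem.List.enumerate, hM]
  | cons c cs ih =>
    intro s w m M hw hM
    simp only [List.map_cons, List.foldl_cons] at hM
    rw [PySem.List.enumerate_cons, List.map_cons, PySem.List.enumerate_cons]
    simp only [List.foldl_cons]
    have hstep : solveAltStep (some (w, m)) (s, c) =
        some (if m ≤ c.sum then (s + 1, c.sum) else (w, m)) := by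
      simp only [solveAltStep]
      rcases lt_trichotomy m c.sum with h | h | h
      · simp [h, le_of_lt h]
      · simp [h, show w < s + 1 by omega]
      · simp [not_lt_of_gt h, not_le_of_gt h, ne_of_gt h]
    rw [hstep]
    have hmax := PySem.List.le_foldl_max (cs.map (fun x => x.sum)) (max m c.sum)
    by_cases hmc : m ≤ c.sum
    · simp only [hmc, if_true]
      rw [ih (s + 1) (s + 1) c.sum M (le_refl _) (by rw [hM, max_eq_right hmc])]
      by_cases hc : c.sum = M
      · simp [hc]
      · -- inits (s+1) vs w : M lies in the tail, so the scan ignores the init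
        have hMmem : M ∈ cs.map (fun x => x.sum) := by
          rcases foldl_max_mem (cs.map (fun x => x.sum)) (max m c.sum) with h | h
          · exfalso
            rw [hM, h, max_eq_right hmc] at hc
            exact hc rfl
          · rw [hM]; exact h
        rw [scan_indep M _ hMmem (s + 1) (s + 1) w]
        simp [hc]
    · simp only [hmc, if_false]
      have hlt : c.sum < m := lt_of_not_ge hmc
      rw [ih (s + 1) w m M (by omega) (by rw [hM, max_eq_left (le_of_lt hlt)])]
      have hcM : ¬ (c.sum = M) := by
        have : max m c.sum ≤ M := by rw [hM]; exact hmax.1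
        rw [max_eq_left (le_of_lt hlt)] at this
        omega
      simp [hcM]

-- ===== VERDICT (by name: the statement is the Claim_ definition above) =====
theorem solve_spec : Claim_equal_solve := by
  intro cs _ hpre
  unfold Spec_solve
  match cs, hpre with
  | c :: rest, _ =>
    unfold solve solve_alt
    -- B side: peel the first enumerate step, then apply the invariant
    rw [show PySem.List.enumerate (c :: rest) 0 =
        (0, c) :: PySem.List.enumerate rest 1 from PySem.List.enumerate_cons c rest 0]
    simp only [List.foldl_cons]
    have hbfirst : solveAltStep none (0, c) = some (1, c.sum) := rfl
    set M := (rest.map (fun x => x.sum)).foldl max c.sum with hMdef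
    rw [hbfirst, main_inv rest 1 1 c.sum M (le_refl _) hMdef]
    -- A side
    rw [PySem.List.foldl_append_singleton_eq_map (fun score => score.sum) rest ([] ++ [c.sum])]
    simp only [List.nil_append, List.singleton_append]
    rw [PySem.List.max?_id_cons]
    rw [show PySem.List.enumerate (c.sum :: rest.map (fun x => x.sum)) 0 =
        (0, c.sum) :: PySem.List.enumerate (rest.map (fun x => x.sum)) 1 from
      PySem.List.enumerate_cons c.sum _ 0]
    simp only [List.foldl_cons]
    rw [show List.foldl max c.sum (List.map (fun score => score.sum) rest) = M from hMdef.symm]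
    by_cases hc : c.sum = M
    · simp [hc]
    · simp only [hc, if_false]
      have hMmem : M ∈ rest.map (fun x => x.sum) := by
        rcases foldl_max_mem (rest.map (fun x => x.sum)) c.sum with h | h
        · exact absurd (hMdef.trans h).symm hc
        · rw [hMdef]; exact h
      rw [scan_indep M _ hMmem 1 0 1]
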